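-- pv_equiv track=rewrite | github.com/AnasHamrouni/LOL-BestChampPick | GetChamps.py | best_pick
-- ===== SOURCE A (Python) =====
-- def best_pick(myTeam ,enemyTeam,games_data):
--     iteration = 0
--     min4 = []
--     min3 = []
--     min2 = []
--     min1 = []
--     for v in games_data:
--         m = set.intersection(set(myTeam), set(v[0]))
--         e = set.intersection(set(myTeam), set(v[1]))
--         lenm=len(m)
--         lene=len(e)
--         if((lenm==4) or (lene==4)):
--             min4.append(games_data[iteration])
--             min3.append(games_data[iteration])
--             min2.append(games_data[iteration])
--             min1.append(games_data[iteration])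
--         elif((lenm==3) or (lene==3)):
--             min3.append(games_data[iteration])
--             min2.append(games_data[iteration])
--             min1.append(games_data[iteration])
--         elif((lenm==2) or (lene==2)):
--             min2.append(games_data[iteration])
--             min1.append(games_data[iteration])
--         elif((lenm==1) or (lene==1)):
--             min1.append(games_data[iteration])
--         iteration += 1
--     if (len(min4) != 0):
--         return min4
--     elif (len(min3) != 0):
--         return min3
--     elif(len(min2) != 0):
--         return min2
--     elif(len(min1) != 0):
--         return min1
--     else:
--         return "nothing found"
-- ===== SOURCE B (Python) =====
-- def best_pick(myTeam, enemyTeam, games_data):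
--     # one pass: per-game overlap "level" (largest of the two intersection sizes
--     # that lies in 1..4, else 0), then filter the games at the maximum level
--     def level(v):
--         lenm = len(set(myTeam) & set(v[0]))
--         lene = len(set(myTeam) & set(v[1]))
--         cand = [l for l in (lenm, lene) if 1 <= l <= 4]
--         return max(cand, default=0)
--     levels = [level(v) for v in games_data]
--     maxlevel = max(levels, default=0)
--     if maxlevel == 0:
--         return "nothing found"
--     return [g for g, l in zip(games_data, levels) if l == maxlevel]
-- ===== Notes on version B (the rewrite author's own statement) =====
-- stated objective: simpler
-- what changed: Replaces the four cumulative min4/min3/min2/min1 append-lists and the four-way if-chains by a per-game overlap level (largest intersection size in 1..4, else 0), a single max, and one filter at that maximum level.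
-- outside the precondition, e.g. on best_pick(['a'], ['b'], [[['x'], ['y']]]): A returns 'nothing found', B returns 'nothing found'; on best_pick(['a'], ['b'], [[['a']]]): A raises IndexError, B raises IndexError
import Mathlib
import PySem

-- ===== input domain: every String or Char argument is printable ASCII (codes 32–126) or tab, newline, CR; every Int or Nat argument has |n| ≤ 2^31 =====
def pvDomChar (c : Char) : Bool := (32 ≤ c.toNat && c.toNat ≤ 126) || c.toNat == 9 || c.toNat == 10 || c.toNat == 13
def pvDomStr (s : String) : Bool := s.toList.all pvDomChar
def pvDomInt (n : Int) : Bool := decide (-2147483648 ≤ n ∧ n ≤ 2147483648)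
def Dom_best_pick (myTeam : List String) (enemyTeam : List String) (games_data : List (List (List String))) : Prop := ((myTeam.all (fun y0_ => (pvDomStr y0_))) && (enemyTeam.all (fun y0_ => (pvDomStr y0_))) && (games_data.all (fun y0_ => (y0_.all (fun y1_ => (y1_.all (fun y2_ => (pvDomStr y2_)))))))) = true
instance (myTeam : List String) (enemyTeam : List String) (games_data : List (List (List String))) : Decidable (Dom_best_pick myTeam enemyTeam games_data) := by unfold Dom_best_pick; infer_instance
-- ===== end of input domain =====

-- B replaces A's four cumulative min4..min1 append-lists by a per-game overlap level,
-- one max and one filter (objective: simpler). Equivalence is about the return value.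

-- ===== PORT A =====
-- len(set.intersection(set(xs), set(ys)))  (both Pythons contain this expression verbatim)
def bpInterLen (xs ys : List String) : Int :=
  PySem.Set.len (PySem.Set.inter (PySem.Set.ofList xs) (PySem.Set.ofList ys))

-- the body of A's for-loop; total via getD [] (Pre_ excludes games shorter than 2, where Python raises IndexError)
def bpStepA (myTeam : List String)
    (acc : List (List (List String)) × List (List (List String)) × List (List (List String)) × List (List (List String)))
    (v : List (List String)) :
    List (List (List String)) × List (List (List String)) × List (List (List String)) × List (List (List String)) :=
  let lenm := bpInterLen myTeam ((PySem.List.pyGet? v 0).getD [])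
  let lene := bpInterLen myTeam ((PySem.List.pyGet? v 1).getD [])
  let (min4, min3, min2, min1) := acc
  if lenm == 4 || lene == 4 then (min4 ++ [v], min3 ++ [v], min2 ++ [v], min1 ++ [v])
  else if lenm == 3 || lene == 3 then (min4, min3 ++ [v], min2 ++ [v], min1 ++ [v])
  else if lenm == 2 || lene == 2 then (min4, min3, min2 ++ [v], min1 ++ [v])
  else if lenm == 1 || lene == 1 then (min4, min3, min2, min1 ++ [v])
  else (min4, min3, min2, min1)

def best_pick (myTeam : List String) (enemyTeam : List String) (games_data : List (List (List String))) : List (List (List String)) :=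
  let r := games_data.foldl (bpStepA myTeam) ([], [], [], [])
  let (min4, min3, min2, min1) := r
  if min4.length ≠ 0 then min4
  else if min3.length ≠ 0 then min3
  else if min2.length ≠ 0 then min2
  else if min1.length ≠ 0 then min1
  else []  -- Python returns the string "nothing found" here; excluded by Pre_

-- ===== PORT B =====
-- per-game level: max of the two intersection sizes lying in 1..4, default 0
def bpLevel (myTeam : List String) (v : List (List String)) : Int :=
  let lenm := bpInterLen myTeam ((PySem.List.pyGet? v 0).getD [])
  let lene := bpInterLen myTeam ((PySem.List.pyGet? v 1).getD [])
  ([lenm, lene].filter (fun l => decide (1 ≤ l) && decide (l ≤ 4))).foldl max 0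

def best_pick_alt (myTeam : List String) (enemyTeam : List String) (games_data : List (List (List String))) : List (List (List String)) :=
  let levels := games_data.map (bpLevel myTeam)
  let maxlevel := levels.foldl max 0
  if maxlevel == 0 then []  -- Python returns the string "nothing found" here; excluded by Pre_
  else ((games_data.zip levels).filter (fun p => p.2 == maxlevel)).map Prod.fst

-- ===== PRECONDITION & SPEC =====
-- number of distinct elements of xs that occur in ys (stated independently of the ports)
def pvCommon (xs ys : List String) : Int := (((PySem.List.dedup xs).filter (fun x => ys.contains x)).length : Int)

-- Pre_ excludes (a) games with fewer than 2 entries, on which A raises IndexError, and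
-- (b) inputs where no game's intersection size with myTeam lies in 1..4, on which A
-- returns the string "nothing found", which is not a value of the declared list type.
def Pre_best_pick (myTeam : List String) (enemyTeam : List String) (games_data : List (List (List String))) : Prop :=
  (∀ v ∈ games_data, 2 ≤ v.length) ∧
  (∃ v ∈ games_data,
    (1 ≤ pvCommon myTeam (v.headD []) ∧ pvCommon myTeam (v.headD []) ≤ 4) ∨
    (1 ≤ pvCommon myTeam ((v.drop 1).headD []) ∧ pvCommon myTeam ((v.drop 1).headD []) ≤ 4))
instance (myTeam : List String) (enemyTeam : List String) (games_data : List (List (List String))) : Decidable (Pre_best_pick myTeam enemyTeam games_data) := by unfold Pre_best_pick; infer_instance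

def pvWitness_best_pick : List String × List String × List (List (List String)) :=
  (["a", "b"], ["c"], [[["a", "x"], ["y"]], [["z"], ["w"]]])

def Spec_best_pick (myTeam : List String) (enemyTeam : List String) (games_data : List (List (List String))) (out : List (List (List String))) : Prop := out = best_pick_alt myTeam enemyTeam games_data
instance (myTeam : List String) (enemyTeam : List String) (games_data : List (List (List String))) (out : List (List (List String))) : Decidable (Spec_best_pick myTeam enemyTeam games_data out) := by unfold Spec_best_pick; infer_instance

-- ===== CLAIM (what is proved, stated in full; the proofs are below) =====
def Claim_equal_best_pick : Prop := ∀ (myTeam : List String) (enemyTeam : List String) (games_data : List (List (List String))), Dom_best_pick myTeam enemyTeam games_data → Pre_best_pick myTeam enemyTeam games_data → Spec_best_pick myTeam enemyTeam games_data (best_pick myTeam enemyTeam games_data)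

-- ===== LEMMAS AND PROOFS =====

-- the level as B computes it, as an if-chain over the two intersection sizes
theorem bpLevel_chain (myTeam : List String) (v : List (List String)) :
    bpLevel myTeam v =
      (let lenm := bpInterLen myTeam ((PySem.List.pyGet? v 0).getD [])
       let lene := bpInterLen myTeam ((PySem.List.pyGet? v 1).getD [])
       if lenm == 4 || lene == 4 then 4
       else if lenm == 3 || lene == 3 then 3
       else if lenm == 2 || lene == 2 then 2
       else if lenm == 1 || lene == 1 then 1
       else 0) := by
  unfold bpLevel
  generalize bpInterLen myTeam ((PySem.List.pyGet? v 0).getD []) = a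
  generalize bpInterLen myTeam ((PySem.List.pyGet? v 1).getD []) = b
  dsimp only
  simp only [List.filter_cons, List.filter_nil, Bool.and_eq_true, decide_eq_true_eq,
    beq_iff_eq, Bool.or_eq_true]
  split_ifs <;> simp only [List.foldl_cons, List.foldl_nil] <;> omega

theorem bpLevel_le (myTeam : List String) (v : List (List String)) : bpLevel myTeam v ≤ 4 := by
  rw [bpLevel_chain]; dsimp only; split_ifs <;> omega

-- A's loop body appends to min_k exactly when the level is ≥ k
theorem bpStepA_eq (myTeam : List String) (a4 a3 a2 a1 : List (List (List String)))
    (v : List (List String)) :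
    bpStepA myTeam (a4, a3, a2, a1) v =
      (if 4 ≤ bpLevel myTeam v then a4 ++ [v] else a4,
       if 3 ≤ bpLevel myTeam v then a3 ++ [v] else a3,
       if 2 ≤ bpLevel myTeam v then a2 ++ [v] else a2,
       if 1 ≤ bpLevel myTeam v then a1 ++ [v] else a1) := by
  rw [bpLevel_chain]
  unfold bpStepA
  dsimp only
  split_ifs <;> simp_all <;> omega

-- A's fold computes the four level-threshold filters
theorem foldA_eq (myTeam : List String) (games : List (List (List String)))
    (a4 a3 a2 a1 : List (List (List String))) :
    games.foldl (bpStepA myTeam) (a4, a3, a2, a1) =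
      (a4 ++ games.filter (fun v => 4 ≤ bpLevel myTeam v),
       a3 ++ games.filter (fun v => 3 ≤ bpLevel myTeam v),
       a2 ++ games.filter (fun v => 2 ≤ bpLevel myTeam v),
       a1 ++ games.filter (fun v => 1 ≤ bpLevel myTeam v)) := by
  induction games generalizing a4 a3 a2 a1 with
  | nil => simp
  | cons v t ih =>
    simp only [List.foldl_cons, List.filter_cons, bpStepA_eq, ih]
    split_ifs <;> simp only [decide_eq_true_eq] at * <;> first | omega | simp

-- foldl max facts (over Int)
theorem init_le_foldl_max (l : List Int) (i : Int) : i ≤ l.foldl max i := by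
  induction l generalizing i with
  | nil => simp
  | cons x t ih => exact le_trans (le_max_left i x) (ih (max i x))

theorem mem_le_foldl_max {l : List Int} {x : Int} (i : Int) (h : x ∈ l) :
    x ≤ l.foldl max i := by
  induction l generalizing i with
  | nil => simp at h
  | cons y t ih =>
    simp only [List.foldl_cons]
    rcases List.mem_cons.mp h with rfl | h
    · exact le_trans (le_max_right i x) (init_le_foldl_max t (max i x))
    · exact ih (max i y) h

theorem foldl_max_mem {l : List Int} {i : Int} :
    l.foldl max i ∈ l ∨ l.foldl max i = i := by
  induction l generalizing i with
  | nil => simp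
  | cons x t ih =>
    simp only [List.foldl_cons]
    rcases @ih (max i x) with h | h
    · exact Or.inl (List.mem_cons_of_mem x h)
    · rcases max_choice i x with hm | hm
      · exact Or.inr (h.trans hm)
      · exact Or.inl (by rw [h.trans hm]; exact List.mem_cons_self)

-- the zip-filter-map in B is a plain filter
theorem zip_filter_map (f : List (List String) → Int) (M : Int) (games : List (List (List String))) :
    (((games.zip (games.map f)).filter (fun p => p.2 == M)).map Prod.fst) =
      games.filter (fun v => f v == M) := by
  induction games with
  | nil => rfl
  | cons v t ih =>
    simp only [List.map_cons, List.zip_cons_cons, List.filter_cons]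
    by_cases h : f v = M <;> simp [h, ih]

-- Pre_'s pvCommon is the ports' bpInterLen
theorem pvCommon_eq (xs ys : List String) : pvCommon xs ys = bpInterLen xs ys := by
  unfold pvCommon bpInterLen
  rw [PySem.List.dedup_eq_ofList]
  have : PySem.Set.inter (PySem.Set.ofList xs) (PySem.Set.ofList ys) =
      (PySem.Set.ofList xs).filter (fun x => (PySem.Set.ofList ys).contains x) := rfl
  rw [show PySem.Set.len (PySem.Set.inter (PySem.Set.ofList xs) (PySem.Set.ofList ys)) =
      (((PySem.Set.ofList xs).filter (fun x => (PySem.Set.ofList ys).contains x)).length : Int) from rfl]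
  congr 2
  apply List.filter_congr
  intro x _
  simp [PySem.Set.mem_ofList]

theorem pyGet_two (v : List (List String)) (h : 2 ≤ v.length) :
    ((PySem.List.pyGet? v 0).getD [] = v.headD []) ∧
    ((PySem.List.pyGet? v 1).getD [] = (v.drop 1).headD []) := by
  match v, h with
  | a :: b :: t, _ =>
    have hc : (0:Int) ≤ (t.length:Int) + 1 := by positivity
    constructor <;> simp [PySem.List.pyGet?, PySem.List.pyIdx?, hc]

theorem best_pick_spec_aux (myTeam enemyTeam : List String) (games : List (List (List String)))
    (hpre : Pre_best_pick myTeam enemyTeam games) :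
    best_pick myTeam enemyTeam games = best_pick_alt myTeam enemyTeam games := by
  obtain ⟨hlen, v0, hv0, hl0⟩ := hpre
  -- the witness game has level ≥ 1
  have hg := pyGet_two v0 (hlen v0 hv0)
  rw [← hg.1, ← hg.2, pvCommon_eq, pvCommon_eq] at hl0
  have hv0lvl : 1 ≤ bpLevel myTeam v0 := by
    unfold bpLevel
    dsimp only
    rcases hl0 with ⟨h1, h2⟩ | ⟨h1, h2⟩
    · exact le_trans h1 (mem_le_foldl_max 0 (by simp [List.mem_filter, h1, h2]))
    · exact le_trans h1 (mem_le_foldl_max 0 (by simp [List.mem_filter, h1, h2]))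
  -- facts about the maximum level M
  have hMle : (games.map (bpLevel myTeam)).foldl max 0 ≤ 4 := by
    rcases @foldl_max_mem (games.map (bpLevel myTeam)) 0 with h | h
    · obtain ⟨v, _, hveq⟩ := List.mem_map.mp h
      exact hveq ▸ bpLevel_le myTeam v
    · omega
  have hMge : 1 ≤ (games.map (bpLevel myTeam)).foldl max 0 :=
    le_trans hv0lvl (mem_le_foldl_max 0 (List.mem_map_of_mem hv0))
  have hMmem : ∃ v ∈ games, bpLevel myTeam v = (games.map (bpLevel myTeam)).foldl max 0 := by
    rcases @foldl_max_mem (games.map (bpLevel myTeam)) 0 with h | h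
    · obtain ⟨v, hv, hveq⟩ := List.mem_map.mp h
      exact ⟨v, hv, hveq⟩
    · omega
  have hub : ∀ v ∈ games, bpLevel myTeam v ≤ (games.map (bpLevel myTeam)).foldl max 0 :=
    fun v hv => mem_le_foldl_max 0 (List.mem_map_of_mem hv)
  unfold best_pick best_pick_alt
  rw [foldA_eq]
  dsimp only
  rw [zip_filter_map]
  obtain ⟨M, hMd⟩ : ∃ M, (games.map (bpLevel myTeam)).foldl max 0 = M := ⟨_, rfl⟩
  rw [hMd] at hMle hMge hMmem hub ⊢
  have hfe : ∀ k : Int, M < k → games.filter (fun v => k ≤ bpLevel myTeam v) = [] := by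
    intro k hk
    rw [List.filter_eq_nil_iff]
    intro v hv
    have := hub v hv
    simp only [decide_eq_true_eq]
    omega
  have hne : games.filter (fun v => M ≤ bpLevel myTeam v) ≠ [] := by
    obtain ⟨v, hv, hvM⟩ := hMmem
    intro hnil
    have : v ∈ games.filter (fun v => M ≤ bpLevel myTeam v) := by
      simp [List.mem_filter, hv, hvM]
    simp [hnil] at this
  have heq : games.filter (fun v => M ≤ bpLevel myTeam v) =
      games.filter (fun v => bpLevel myTeam v == M) := by
    apply List.filter_congr
    intro v hv
    have h2 := hub v hv
    by_cases hEq : bpLevel myTeam v = M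
    · simp [hEq]
    · have h3 : ¬ (M ≤ bpLevel myTeam v) := by omega
      simp [hEq, h3]
  rcases (by omega : M = 1 ∨ M = 2 ∨ M = 3 ∨ M = 4) with rfl | rfl | rfl | rfl
  · simp only [hfe 4 (by omega), hfe 3 (by omega), hfe 2 (by omega)]
    simp_all [List.length_eq_zero_iff, heq]
  · simp only [hfe 4 (by omega), hfe 3 (by omega)]
    simp_all [List.length_eq_zero_iff, heq]
  · simp only [hfe 4 (by omega)]
    simp_all [List.length_eq_zero_iff, heq]
  · simp_all [List.length_eq_zero_iff, heq]

-- ===== VERDICT (by name: the statement is the Claim_ definition above) =====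
theorem best_pick_spec : Claim_equal_best_pick := by
  intro myTeam enemyTeam games _ hpre
  exact best_pick_spec_aux myTeam enemyTeam games hpre
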